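-- pv_equiv track=rewrite | github.com/vladrotariu1/laborator-python | lab2/6-x-times-in-lists.py | get_values_occurring_n_times_in_lists
-- ===== SOURCE A (Python) =====
-- from collections import Counter
--
-- def get_values_occurring_n_times_in_lists(lists, number_occurrences):
--     dictionary = Counter({})
--     result = []
--
--     for lst in lists:
--         dictionary += Counter(lst)
--
--     for key, value in dict(dictionary).items():
--         if value == number_occurrences:
--             result.append(key)
--
--     return result
-- ===== SOURCE B (Python) =====
-- def get_values_occurring_n_times_in_lists(lists, number_occurrences):
--     seen = set()
--     order = []
--     for lst in lists:
--         for value in lst: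
--             if value not in seen:
--                 seen.add(value)
--                 order.append(value)
--     return [value for value in order
--             if sum(lst.count(value) for lst in lists) == number_occurrences]
-- ===== Notes on version B (the rewrite author's own statement) =====
-- stated objective: alternative
-- what changed: Replaces A's Counter-per-list hash merging with a first-appearance dedup pass (set + order list) followed by per-value totals computed as sum(lst.count(value) for lst in lists).
import Mathlib
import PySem

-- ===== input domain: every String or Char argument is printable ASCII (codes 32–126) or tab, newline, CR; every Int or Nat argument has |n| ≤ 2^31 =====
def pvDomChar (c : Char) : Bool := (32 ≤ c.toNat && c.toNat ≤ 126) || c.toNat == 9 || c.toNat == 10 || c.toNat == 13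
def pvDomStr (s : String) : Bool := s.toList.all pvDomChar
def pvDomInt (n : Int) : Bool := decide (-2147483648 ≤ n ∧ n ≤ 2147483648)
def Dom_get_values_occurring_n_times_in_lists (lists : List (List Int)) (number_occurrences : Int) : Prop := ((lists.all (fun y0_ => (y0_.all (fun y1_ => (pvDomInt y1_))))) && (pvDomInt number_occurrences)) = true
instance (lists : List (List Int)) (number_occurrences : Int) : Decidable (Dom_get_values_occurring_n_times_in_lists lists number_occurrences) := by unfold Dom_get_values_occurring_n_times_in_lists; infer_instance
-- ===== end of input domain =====

-- B replaces A's Counter-merging hash pass by an explicit first-appearance dedup followed by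
-- per-value total counts via repeated list scans (objective: alternative; return value only).

-- ===== PORT A =====
def get_values_occurring_n_times_in_lists (lists : List (List Int)) (number_occurrences : Int) : List Int :=
  -- dictionary = Counter({}); for lst in lists: dictionary += Counter(lst)
  -- (Counter.__iadd__: for key, cnt in other.items(): self[key] = self.get(key, 0) + cnt)
  let dictionary : PySem.Dict Int Int := lists.foldl
    (fun dictionary lst =>
      (PySem.Dict.counter lst).items.foldl
        (fun d kv => d.insert kv.1 (d.getD kv.1 0 + kv.2)) dictionary)
    PySem.Dict.empty
  -- for key, value in dict(dictionary).items(): if value == number_occurrences: result.append(key)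
  dictionary.items.foldl
    (fun result kv => if kv.2 == number_occurrences then result ++ [kv.1] else result) []

-- ===== PORT B =====
def get_values_occurring_n_times_in_lists_alt (lists : List (List Int)) (number_occurrences : Int) : List Int :=
  -- seen = set(); order = []; nested loop appending first appearances
  let p : PySem.Set Int × List Int := lists.foldl
    (fun p lst => lst.foldl
      (fun p value =>
        if PySem.Set.contains p.1 value then p
        else (PySem.Set.add p.1 value, p.2 ++ [value])) p)
    (PySem.Set.empty, [])
  -- [value for value in order if sum(lst.count(value) for lst in lists) == number_occurrences]
  p.2.filter (fun value =>
    (lists.map (fun lst => (PySem.List.count lst value : Int))).sum == number_occurrences)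

-- ===== PRECONDITION & SPEC =====
def Spec_get_values_occurring_n_times_in_lists (lists : List (List Int)) (number_occurrences : Int) (out : List Int) : Prop := out = get_values_occurring_n_times_in_lists_alt lists number_occurrences
instance (lists : List (List Int)) (number_occurrences : Int) (out : List Int) : Decidable (Spec_get_values_occurring_n_times_in_lists lists number_occurrences out) := by unfold Spec_get_values_occurring_n_times_in_lists; infer_instance

-- ===== CLAIM (what is proved, stated in full; the proofs are below) =====
def Claim_equal_get_values_occurring_n_times_in_lists : Prop := ∀ (lists : List (List Int)) (number_occurrences : Int), Dom_get_values_occurring_n_times_in_lists lists number_occurrences → Spec_get_values_occurring_n_times_in_lists lists number_occurrences (get_values_occurring_n_times_in_lists lists number_occurrences)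

-- ===== LEMMAS AND PROOFS =====

-- getD after A's merge loop over distinct keyed pairs (a, f a)
theorem pv_getD_foldl_ins (ks : List Int) (f : Int → Int) (k : Int) :
    ∀ d : PySem.Dict Int Int, ks.Nodup →
      ((ks.map (fun a => (a, f a))).foldl
        (fun d kv => d.insert kv.1 (d.getD kv.1 0 + kv.2)) d).getD k 0 =
      d.getD k 0 + (if k ∈ ks then f k else 0) := by
  induction ks with
  | nil => intro d _; simp
  | cons a ks ih =>
    intro d hnd
    simp only [List.map_cons, List.foldl_cons]
    rw [ih _ (List.Nodup.of_cons hnd)]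
    rw [PySem.Dict.getD_insert]
    by_cases hk : k = a
    · subst hk
      have : k ∉ ks := (List.nodup_cons.mp hnd).1
      simp [this]
    · simp [hk, List.mem_cons]

-- x ∈ l.foldl Set.add s whenever x ∈ s or x ∈ l
theorem pv_mem_foldl_add (x : Int) : ∀ (l s : List Int), x ∈ s ∨ x ∈ l →
    x ∈ l.foldl PySem.Set.add s := by
  intro l
  induction l with
  | nil => intro s h; simpa using h
  | cons y l ih =>
    intro s h
    simp only [List.foldl_cons]
    apply ih
    rcases h with h | h
    · exact Or.inl (by simp [PySem.Set.mem_add, h])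
    · rcases List.mem_cons.mp h with h | h
      · exact Or.inl (by simp [PySem.Set.mem_add, h])
      · exact Or.inr h

-- Set.update commutes with a single Set.add
theorem pv_update_add (s t : List Int) (x : Int) :
    PySem.Set.update s (PySem.Set.add t x) = PySem.Set.add (PySem.Set.update s t) x := by
  by_cases hx : x ∈ t
  · have h1 : PySem.Set.add t x = t := by
      simp [PySem.Set.add, PySem.Set.contains, hx]
    have h2 : x ∈ PySem.Set.update s t := by
      have := pv_mem_foldl_add x t s (Or.inr hx)
      simpa [PySem.Set.update] using this
    have h3 : PySem.Set.add (PySem.Set.update s t) x = PySem.Set.update s t := by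
      simp [PySem.Set.add, PySem.Set.contains, h2]
    rw [h1, h3]
  · have h1 : PySem.Set.add t x = t ++ [x] := by
      simp [PySem.Set.add, PySem.Set.contains, hx]
    rw [h1]
    simp [PySem.Set.update, List.foldl_append]

-- updating with a foldl-add accumulation
theorem pv_update_foldl (l : List Int) : ∀ (s t : List Int),
    PySem.Set.update s (l.foldl PySem.Set.add t) =
    PySem.Set.update (PySem.Set.update s t) l := by
  induction l with
  | nil => intro s t; simp [PySem.Set.update]
  | cons x l ih =>
    intro s t
    simp only [List.foldl_cons]
    rw [ih, pv_update_add]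
    simp [PySem.Set.update]

-- Set.update ignores dedup of its argument
theorem pv_update_ofList (s l : List Int) :
    PySem.Set.update s (PySem.Set.ofList l) = PySem.Set.update s l := by
  have h := pv_update_foldl l s []
  simpa [PySem.Set.ofList_eq_foldl, PySem.Set.update] using h

-- A's '+= Counter(lst)' merge equals the element-by-element counting loop
theorem pv_merge_eq (lst : List Int) (d : PySem.Dict Int Int) (hnd : d.keys.Nodup) :
    (PySem.Dict.counter lst).items.foldl
        (fun d kv => d.insert kv.1 (d.getD kv.1 0 + kv.2)) d =
    lst.foldl (fun d x => d.modify x 0 (· + 1)) d := by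
  have hkL : ((PySem.Dict.counter lst).items.foldl
      (fun d kv => d.insert kv.1 (d.getD kv.1 0 + kv.2)) d).keys =
      PySem.Set.update d.keys lst := by
    rw [PySem.Dict.keys_foldl_insert_key (key := Prod.fst)]
    have : (PySem.Dict.counter lst).items.map Prod.fst = PySem.Set.ofList lst := by
      rw [← PySem.Dict.keys_counter (xs := lst)]
      rfl
    rw [this, pv_update_ofList]
  have hkR : (lst.foldl (fun d x => d.modify x 0 (· + 1)) d).keys =
      PySem.Set.update d.keys lst := PySem.Dict.keys_foldl_modify lst _ _ d
  have hndL : ((PySem.Dict.counter lst).items.foldl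
      (fun d kv => d.insert kv.1 (d.getD kv.1 0 + kv.2)) d).keys.Nodup :=
    PySem.Dict.nodup_keys_foldl_insert_key _ _ _ _ hnd
  have hndR : (lst.foldl (fun d x => d.modify x 0 (· + 1)) d).keys.Nodup := by
    have := PySem.Dict.nodup_keys_foldl_modify_key lst (fun x => x) 0 (fun _ _ => (· + 1)) d hnd
    simpa using this
  have hgd : ∀ k, ((PySem.Dict.counter lst).items.foldl
      (fun d kv => d.insert kv.1 (d.getD kv.1 0 + kv.2)) d).getD k 0 =
      (lst.foldl (fun d x => d.modify x 0 (· + 1)) d).getD k 0 := by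
    intro k
    rw [PySem.Dict.getD_foldl_modify_add_one]
    rw [PySem.Dict.items_counter]
    rw [pv_getD_foldl_ins _ _ _ d (PySem.Set.nodup_ofList lst)]
    by_cases hk : k ∈ lst
    · simp [PySem.Set.mem_ofList, hk]
    · simp [PySem.Set.mem_ofList, hk, List.count_eq_zero.mpr hk]
  apply PySem.Dict.ext
  rw [PySem.Dict.items_eq_map_keys _ hndL 0, PySem.Dict.items_eq_map_keys _ hndR 0, hkL, hkR]
  apply List.map_congr_left
  intro k _
  rw [hgd k]

-- A's dictionary over all lists is the counter of the flattened input
theorem pv_dictA_eq (lists : List (List Int)) : ∀ d : PySem.Dict Int Int, d.keys.Nodup →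
    lists.foldl (fun dictionary lst =>
      (PySem.Dict.counter lst).items.foldl
        (fun d kv => d.insert kv.1 (d.getD kv.1 0 + kv.2)) dictionary) d =
    lists.flatten.foldl (fun d x => d.modify x 0 (· + 1)) d := by
  induction lists with
  | nil => intro d _; simp
  | cons lst rest ih =>
    intro d hnd
    simp only [List.foldl_cons, List.flatten_cons, List.foldl_append]
    rw [pv_merge_eq lst d hnd]
    apply ih
    have := PySem.Dict.nodup_keys_foldl_modify_key lst (fun x => x) 0 (fun _ _ => (· + 1)) d hnd
    simpa using this

-- B's inner dedup loop keeps seen = order and is a foldl of Set.add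
theorem pv_pair_fold (lst : List Int) : ∀ s : PySem.Set Int,
    lst.foldl (fun p value =>
        if PySem.Set.contains p.1 value then p
        else (PySem.Set.add p.1 value, p.2 ++ [value])) (s, s) =
      (lst.foldl PySem.Set.add s, lst.foldl PySem.Set.add s) := by
  induction lst with
  | nil => intro s; simp
  | cons x lst ih =>
    intro s
    simp only [List.foldl_cons]
    have hstep : (if PySem.Set.contains s x then ((s : PySem.Set Int), s)
        else (PySem.Set.add s x, s ++ [x])) = (PySem.Set.add s x, PySem.Set.add s x) := by
      by_cases h : x ∈ s
      · simp [PySem.Set.add, PySem.Set.contains, h]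
      · simp [PySem.Set.add, PySem.Set.contains, h]
    rw [hstep, ih]

-- B's whole dedup pass produces set(flatten) in first-appearance order (twice)
theorem pv_pair_fold_outer (lists : List (List Int)) : ∀ s : PySem.Set Int,
    lists.foldl (fun p lst => lst.foldl (fun p value =>
        if PySem.Set.contains p.1 value then p
        else (PySem.Set.add p.1 value, p.2 ++ [value])) p) (s, s) =
      (lists.flatten.foldl PySem.Set.add s, lists.flatten.foldl PySem.Set.add s) := by
  induction lists with
  | nil => intro s; simp
  | cons lst rest ih =>
    intro s
    simp only [List.foldl_cons, List.flatten_cons, List.foldl_append]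
    rw [pv_pair_fold lst s, ih]

-- ===== VERDICT (by name: the statement is the Claim_ definition above) =====
theorem get_values_occurring_n_times_in_lists_spec : Claim_equal_get_values_occurring_n_times_in_lists := by
  intro lists number_occurrences _
  unfold Spec_get_values_occurring_n_times_in_lists
  simp only [get_values_occurring_n_times_in_lists, get_values_occurring_n_times_in_lists_alt]
  rw [pv_dictA_eq lists PySem.Dict.empty PySem.Dict.nodup_keys_empty]
  rw [show lists.flatten.foldl (fun d x => d.modify x 0 (· + 1)) PySem.Dict.empty =
        PySem.Dict.counter lists.flatten from (PySem.Dict.counter_eq_foldl lists.flatten).symm]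
  rw [PySem.Dict.items_counter]
  rw [show ((PySem.Set.empty : PySem.Set Int), ([] : List Int)) =
        ((PySem.Set.empty : PySem.Set Int), (PySem.Set.empty : PySem.Set Int)) from rfl,
      pv_pair_fold_outer lists PySem.Set.empty]
  simp only [List.foldl_map]
  rw [PySem.List.foldl_append_if
      (fun k => ((lists.flatten.count k : Int) == number_occurrences)) (fun k => k)
      (PySem.Set.ofList lists.flatten) []]
  simp only [List.nil_append, List.map_id']
  rw [show lists.flatten.foldl PySem.Set.add PySem.Set.empty = PySem.Set.ofList lists.flatten from
        (PySem.Set.ofList_eq_foldl lists.flatten).symm]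
  apply List.filter_congr
  intro k _
  have hc : lists.flatten.count k = (lists.map (fun lst => lst.count k)).sum :=
    List.count_flatten
  simp only [PySem.List.count_eq]
  rw [hc]
  congr 1
  rw [Nat.cast_list_sum]
  simp [List.map_map, Function.comp_def]
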